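-- pv_equiv track=rewrite | github.com/AlexCh1975/PythonDZ3 | task_005/3_5.py | create_list_fib
-- ===== SOURCE A (Python) =====
-- def create_list_fib(num):
--     list_fib = [0]
--     fib1 = fib2 = 1
--
--     for i in range(num):
--         if i == 0:
--             list_fib.append(fib1)
--             list_fib.insert(0, fib1)
--             continue
--         if i == 1:
--             list_fib.append(fib2)
--             list_fib.insert(0, fib2 * -1)
--             continue
--         fib_sum = fib1 + fib2
--         list_fib.append(fib_sum)
--         list_fib.insert(0, (fib_sum) * (-1) ** i)
--         fib1 = fib2
--         fib2 = fib_sum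
--     return list_fib
-- ===== SOURCE B (Python) =====
-- def create_list_fib(num):
--     r = []
--     a = b = 1
--     for _ in range(num):
--         r.append(a)
--         a, b = b, a + b
--     left = [x * (-1) ** i for i, x in enumerate(r)]
--     left.reverse()
--     return left + [0] + r
-- ===== Notes on version B (the rewrite author's own statement) =====
-- stated objective: simpler
-- what changed: Instead of A's loop that both appends and front-inserts each signed value with special branches for the first two iterations, B builds the plain Fibonacci list once in a branch-free loop and assembles the result as reversed signed half + zero + the list in one expression.
import Mathlib
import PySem

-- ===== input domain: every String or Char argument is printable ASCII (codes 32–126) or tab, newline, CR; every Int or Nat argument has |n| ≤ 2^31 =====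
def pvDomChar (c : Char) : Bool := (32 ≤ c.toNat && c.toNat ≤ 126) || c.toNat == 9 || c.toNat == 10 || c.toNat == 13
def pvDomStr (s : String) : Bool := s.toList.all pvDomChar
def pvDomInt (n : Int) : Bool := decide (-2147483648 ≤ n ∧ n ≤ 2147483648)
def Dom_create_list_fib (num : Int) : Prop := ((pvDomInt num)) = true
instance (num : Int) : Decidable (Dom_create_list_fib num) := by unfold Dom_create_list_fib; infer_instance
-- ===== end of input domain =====

-- B builds the Fibonacci list once and assembles the signed mirror with a comprehension,
-- replacing A's per-step front-inserts (objective: simpler decomposition).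

-- ===== PORT A =====
-- loop body of A; `(-1) ** i` is ported as `(-1)^i.toNat`, exact since range(num) yields only nonnegative i
def stepA_create_list_fib (st : List Int × Int × Int) (i : Int) : List Int × Int × Int :=
  if i == 0 then (st.2.1 :: (st.1 ++ [st.2.1]), st.2.1, st.2.2)
  else if i == 1 then ((st.2.2 * -1) :: (st.1 ++ [st.2.2]), st.2.1, st.2.2)
  else
    let fib_sum := st.2.1 + st.2.2
    ((fib_sum * (-1) ^ i.toNat) :: (st.1 ++ [fib_sum]), st.2.2, fib_sum)

def create_list_fib (num : Int) : List Int :=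
  ((PySem.List.pyRange 0 num 1).foldl stepA_create_list_fib ([0], 1, 1)).1

-- ===== PORT B =====
-- loop body of B: r.append(a); a, b = b, a + b
def stepB_create_list_fib (st : List Int × Int × Int) (_i : Int) : List Int × Int × Int :=
  (st.1 ++ [st.2.1], st.2.2, st.2.1 + st.2.2)

def create_list_fib_alt (num : Int) : List Int :=
  let r := ((PySem.List.pyRange 0 num 1).foldl stepB_create_list_fib ([], 1, 1)).1
  -- `(-1) ** i` as `(-1)^p.1.toNat`, exact since enumerate indices are nonnegative
  let left := (PySem.List.enumerate r 0).map (fun p => p.2 * (-1) ^ p.1.toNat)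
  left.reverse ++ [0] ++ r

-- ===== PRECONDITION & SPEC =====
def Spec_create_list_fib (num : Int) (out : List Int) : Prop := out = create_list_fib_alt num
instance (num : Int) (out : List Int) : Decidable (Spec_create_list_fib num out) := by unfold Spec_create_list_fib; infer_instance

-- ===== CLAIM (what is proved, stated in full; the proofs are below) =====
def Claim_equal_create_list_fib : Prop := ∀ (num : Int), Dom_create_list_fib num → Spec_create_list_fib num (create_list_fib num)

-- ===== LEMMAS AND PROOFS =====

-- the shared Fibonacci sequence (F 0 = F 1 = 1)
def pvF : Nat → Int
  | 0 => 1
  | 1 => 1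
  | (n+2) => pvF n + pvF (n+1)

def pvG (i : Nat) : Int := pvF i * (-1) ^ i

def pvRangeZ (n : Nat) : List Int := (List.range n).map Int.ofNat

lemma pvRangeZ_succ (n : Nat) : pvRangeZ (n+1) = pvRangeZ n ++ [Int.ofNat n] := by
  simp [pvRangeZ, List.range_succ]

lemma A_loop (n : Nat) :
    (pvRangeZ n).foldl stepA_create_list_fib ([0], 1, 1)
      = (((List.range n).map pvG).reverse ++ 0 :: (List.range n).map pvF, pvF (n-2), pvF (n-1)) := by
  induction n with
  | zero => simp [pvRangeZ, pvF]
  | succ m ih =>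
    rw [pvRangeZ_succ, List.foldl_append, ih]
    match m with
    | 0 => decide
    | 1 => decide
    | (k+2) =>
      simp only [List.foldl_cons, List.foldl_nil, stepA_create_list_fib,
        Int.ofNat_eq_natCast]
      have h0 : (((k+2 : Nat) : Int) == 0) = false := by simp; omega
      have h1 : (((k+2 : Nat) : Int) == 1) = false := by simp; omega
      have hsum : pvF (k + 2 - 2) + pvF (k + 2 - 1) = pvF (k + 2) := by
        show pvF k + pvF (k + 1) = pvF (k + 2); rw [pvF]
      simp only [h0, h1, Bool.false_eq_true, if_false, Int.toNat_natCast, hsum]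
      simp [List.range_succ, pvG]

lemma B_loop (n : Nat) :
    (pvRangeZ n).foldl stepB_create_list_fib ([], 1, 1)
      = ((List.range n).map pvF, pvF n, pvF (n+1)) := by
  induction n with
  | zero => simp [pvRangeZ, pvF]
  | succ m ih =>
    rw [pvRangeZ_succ, List.foldl_append, ih]
    simp only [List.foldl_cons, List.foldl_nil, stepB_create_list_fib, List.range_succ,
      List.map_append]
    refine Prod.ext rfl (Prod.ext rfl ?_)
    show pvF m + pvF (m + 1) = pvF (m + 2)
    rw [pvF]

lemma enum_map (n : Nat) :
    (PySem.List.enumerate ((List.range n).map pvF) 0).map (fun p => p.2 * (-1) ^ p.1.toNat)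
      = (List.range n).map pvG := by
  induction n with
  | zero => simp [PySem.List.enumerate_nil]
  | succ m ih =>
    rw [List.range_succ, List.map_append, PySem.List.enumerate_append, List.map_append, ih]
    simp [PySem.List.enumerate_cons, PySem.List.enumerate_nil, pvG]

lemma pyRange_cast (num : Int) :
    PySem.List.pyRange 0 num 1 = pvRangeZ num.toNat := by
  rw [PySem.List.pyRange_one]
  simp [pvRangeZ]

-- ===== VERDICT (by name: the statement is the Claim_ definition above) =====
theorem create_list_fib_spec : Claim_equal_create_list_fib := by
  intro num _
  unfold Spec_create_list_fib create_list_fib create_list_fib_alt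
  simp only [pyRange_cast, A_loop, B_loop]
  simp [enum_map]
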